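-- pv_equiv track=rewrite | github.com/sixplusgroup/dialog | emotion_backend/case_generation_evaluation/case_evaluation.py | get_staff_text_score
-- ===== SOURCE A (Python) =====
-- def get_staff_text_score(staff_text_emotions):
--     score = 80
--     pessimistic_num = 0
--     optimistic_num = 0
--     for emotion in staff_text_emotions:
--         emotion = emotion.split(' ')
--         if emotion[0] == 'optimistic':
--             optimistic_num += 1
--             score += 3
--         elif emotion[0] == 'pessimistic':
--             pessimistic_num += 1
--             score -= 5
--             if len(emotion) > 1 and emotion[1] == 'angry':
--                 score -= 5
--     return score, pessimistic_num, optimistic_num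
-- ===== SOURCE B (Python) =====
-- def get_staff_text_score(staff_text_emotions):
--     toks = [e.split(' ') for e in staff_text_emotions]
--     opt = sum(1 for t in toks if t[0] == 'optimistic')
--     pess = sum(1 for t in toks if t[0] == 'pessimistic')
--     angry = sum(1 for t in toks
--                 if t[0] == 'pessimistic' and len(t) > 1 and t[1] == 'angry')
--     return 80 + 3 * opt - 5 * pess - 5 * angry, pess, opt
-- ===== Notes on version B (the rewrite author's own statement) =====
-- stated objective: alternative
-- what changed: Replaced the single running-accumulator loop (score/pessimistic/optimistic updated in-place per element) by split-once tokenisation plus three independent counting passes and the closed-form score 80 + 3*opt - 5*pess - 5*angry.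
import Mathlib
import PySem

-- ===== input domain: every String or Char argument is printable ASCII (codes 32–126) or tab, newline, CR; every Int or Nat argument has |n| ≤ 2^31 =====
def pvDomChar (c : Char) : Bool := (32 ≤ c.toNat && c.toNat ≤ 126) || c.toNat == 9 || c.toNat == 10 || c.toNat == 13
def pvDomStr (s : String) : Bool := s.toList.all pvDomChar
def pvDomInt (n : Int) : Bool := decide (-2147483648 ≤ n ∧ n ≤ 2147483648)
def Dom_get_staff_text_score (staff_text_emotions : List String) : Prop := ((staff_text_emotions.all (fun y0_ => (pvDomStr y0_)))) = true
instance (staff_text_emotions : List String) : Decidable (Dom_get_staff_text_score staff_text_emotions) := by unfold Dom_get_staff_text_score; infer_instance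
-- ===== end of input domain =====

-- B replaces A's single running-accumulator loop by split-once tokenisation, three independent
-- counting passes and the closed-form score 80 + 3*opt - 5*pess - 5*angry (alternative decomposition, same cost).
-- ===== PORT A =====
-- emotion.split(' '): PySem.Str.split? is none only for an empty separator, so .getD [] is exact here
def pvSplit (e : String) : List String := (PySem.Str.split? e " ").getD []
-- Transliteration of A: one pass, three running accumulators (score, pessimistic_num, optimistic_num).
-- emotion[0] is ported as pyGetD … 0 "" — split(' ') never yields an empty list, so the default is never read.
def get_staff_text_score (staff_text_emotions : List String) : Int × Int × Int :=
  staff_text_emotions.foldl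
    (fun st e =>
      let emotion := pvSplit e
      if PySem.List.pyGetD emotion 0 "" = "optimistic" then
        (st.1 + 3, st.2.1, st.2.2 + 1)
      else if PySem.List.pyGetD emotion 0 "" = "pessimistic" then
        if emotion.length > 1 ∧ PySem.List.pyGetD emotion 1 "" = "angry" then
          (st.1 - 5 - 5, st.2.1 + 1, st.2.2)
        else
          (st.1 - 5, st.2.1 + 1, st.2.2)
      else st)
    (80, 0, 0)

-- ===== PORT B =====
-- Transliteration of B: split once, three independent counting passes, closed-form score.
def get_staff_text_score_alt (staff_text_emotions : List String) : Int × Int × Int :=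
  let toks := staff_text_emotions.map (fun e => pvSplit e)
  let opt : Int := (toks.map (fun t => if PySem.List.pyGetD t 0 "" = "optimistic" then (1 : Int) else 0)).sum
  let pess : Int := (toks.map (fun t => if PySem.List.pyGetD t 0 "" = "pessimistic" then (1 : Int) else 0)).sum
  let angry : Int := (toks.map (fun t =>
      if PySem.List.pyGetD t 0 "" = "pessimistic" ∧ t.length > 1 ∧ PySem.List.pyGetD t 1 "" = "angry"
      then (1 : Int) else 0)).sum
  (80 + 3 * opt - 5 * pess - 5 * angry, pess, opt)

-- ===== PRECONDITION & SPEC =====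
def Spec_get_staff_text_score (staff_text_emotions : List String) (out : Int × Int × Int) : Prop := out = get_staff_text_score_alt staff_text_emotions
instance (staff_text_emotions : List String) (out : Int × Int × Int) : Decidable (Spec_get_staff_text_score staff_text_emotions out) := by unfold Spec_get_staff_text_score; infer_instance

-- ===== CLAIM (what is proved, stated in full; the proofs are below) =====
def Claim_equal_get_staff_text_score : Prop := ∀ (staff_text_emotions : List String), Dom_get_staff_text_score staff_text_emotions → Spec_get_staff_text_score staff_text_emotions (get_staff_text_score staff_text_emotions)

-- ===== LEMMAS AND PROOFS =====

-- ===== VERDICT (by name: the statement is the Claim_ definition above) =====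
-- the three per-list counts B computes, as standalone abbreviations for the invariant
def pvOpt (l : List String) : Int :=
  ((l.map (fun e => pvSplit e)).map (fun t => if PySem.List.pyGetD t 0 "" = "optimistic" then (1 : Int) else 0)).sum
def pvPess (l : List String) : Int :=
  ((l.map (fun e => pvSplit e)).map (fun t => if PySem.List.pyGetD t 0 "" = "pessimistic" then (1 : Int) else 0)).sum
def pvAngry (l : List String) : Int :=
  ((l.map (fun e => pvSplit e)).map (fun t =>
      if PySem.List.pyGetD t 0 "" = "pessimistic" ∧ t.length > 1 ∧ PySem.List.pyGetD t 1 "" = "angry"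
      then (1 : Int) else 0)).sum

-- loop invariant for A's fold: the final state is the start state shifted by the three counts
theorem pvLoopA (l : List String) (s p o : Int) :
    l.foldl
      (fun st e =>
        let emotion := pvSplit e
        if PySem.List.pyGetD emotion 0 "" = "optimistic" then
          (st.1 + 3, st.2.1, st.2.2 + 1)
        else if PySem.List.pyGetD emotion 0 "" = "pessimistic" then
          if emotion.length > 1 ∧ PySem.List.pyGetD emotion 1 "" = "angry" then
            (st.1 - 5 - 5, st.2.1 + 1, st.2.2)
          else
            (st.1 - 5, st.2.1 + 1, st.2.2)
        else st)
      (s, p, o)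
    = (s + 3 * pvOpt l - 5 * pvPess l - 5 * pvAngry l, p + pvPess l, o + pvOpt l) := by
  induction l generalizing s p o with
  | nil => simp [pvOpt, pvPess, pvAngry]
  | cons e l ih =>
    simp only [List.foldl_cons]
    by_cases h0 : PySem.List.pyGetD (pvSplit e) 0 "" = "optimistic"
    · simp [h0, ih, pvOpt, pvPess, pvAngry]
      constructor <;> ring
    · by_cases h1 : PySem.List.pyGetD (pvSplit e) 0 "" = "pessimistic"
      · by_cases h2 : (pvSplit e).length > 1 ∧ PySem.List.pyGetD (pvSplit e) 1 "" = "angry"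
        · simp [h1, h2, ih, pvOpt, pvPess, pvAngry]; constructor <;> omega
        · simp [h1, h2, ih, pvOpt, pvPess, pvAngry]; constructor <;> omega
      · simp [h0, h1, ih, pvOpt, pvPess, pvAngry]

-- ===== VERDICT (by name: the statement is the Claim_ definition above) =====
theorem get_staff_text_score_spec : Claim_equal_get_staff_text_score := by
  intro l _
  unfold Spec_get_staff_text_score get_staff_text_score get_staff_text_score_alt
  rw [pvLoopA]
  simp [pvOpt, pvPess, pvAngry]
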